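-- pv_equiv track=rewrite | github.com/nto300002/keikakun_back | app/core/security.py | is_recovery_code_format
-- ===== SOURCE A (Python) =====
-- def is_recovery_code_format(code: str) -> bool:
--     """リカバリーコードの形式をチェック"""
--     if not code:
--         return False
--
--     # 4-4-4-4 形式をチェック
--     parts = code.split('-')
--     if len(parts) != 4:
--         return False
--
--     for part in parts:
--         if len(part) != 4 or not part.isalnum():
--             return False
--
--     return True
-- ===== SOURCE B (Python) =====
-- def is_recovery_code_format(code: str) -> bool:
--     """リカバリーコードの形式をチェック (single pass over the raw string)"""
--     if len(code) != 19:
--         return False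
--     if code[4] != '-' or code[9] != '-' or code[14] != '-':
--         return False
--     for i in range(19):
--         if i == 4 or i == 9 or i == 14:
--             continue
--         if not code[i].isalnum():
--             return False
--     return True
-- ===== Notes on version B (the rewrite author's own statement) =====
-- stated objective: alternative
-- what changed: B validates the code in a single positional pass over the raw string (length 19, dashes at indices 4/9/14, every other character alnum) instead of splitting on '-' and looping over the four parts.
import Mathlib
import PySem

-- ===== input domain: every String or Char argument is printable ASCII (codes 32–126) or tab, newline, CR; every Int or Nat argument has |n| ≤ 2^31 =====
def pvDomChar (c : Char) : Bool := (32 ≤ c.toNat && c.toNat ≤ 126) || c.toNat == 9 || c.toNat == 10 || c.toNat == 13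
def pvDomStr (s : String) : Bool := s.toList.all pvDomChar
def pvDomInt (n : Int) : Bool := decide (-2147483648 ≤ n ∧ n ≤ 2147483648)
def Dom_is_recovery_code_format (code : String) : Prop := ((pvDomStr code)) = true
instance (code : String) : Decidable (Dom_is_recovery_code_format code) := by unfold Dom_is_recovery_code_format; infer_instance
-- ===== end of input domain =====

-- B replaces A's split('-')-and-loop-over-parts check by a single positional pass over the
-- raw string (length 19, dashes at indices 4/9/14, every other index alnum); same cost, different structure.

-- ===== PORT A =====
def is_recovery_code_format (code : String) : Bool :=
  if code.toList.isEmpty then false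
  else
    let parts := PySem.Chars.splitOn code.toList ['-']
    if parts.length ≠ 4 then false
    else parts.all (fun p => p.length == 4 && PySem.Chars.strIsalnum p)

-- ===== PORT B =====
def is_recovery_code_format_alt (code : String) : Bool :=
  if code.toList.length ≠ 19 then false
  else if ¬ (PySem.List.pyGetD code.toList 4 ' ' = '-' ∧ PySem.List.pyGetD code.toList 9 ' ' = '-' ∧
             PySem.List.pyGetD code.toList 14 ' ' = '-') then false
  else (PySem.List.pyRange 0 19 1).all (fun i =>
    i == 4 || i == 9 || i == 14 || PySem.Chars.isalnum (PySem.List.pyGetD code.toList i ' '))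

-- ===== PRECONDITION & SPEC =====
def Spec_is_recovery_code_format (code : String) (out : Bool) : Prop := out = is_recovery_code_format_alt code
instance (code : String) (out : Bool) : Decidable (Spec_is_recovery_code_format code out) := by unfold Spec_is_recovery_code_format; infer_instance

-- ===== CLAIM (what is proved, stated in full; the proofs are below) =====
def Claim_equal_is_recovery_code_format : Prop := ∀ (code : String), Dom_is_recovery_code_format code → Spec_is_recovery_code_format code (is_recovery_code_format code)

-- ===== LEMMAS AND PROOFS =====

-- Structural single-character split on '-' (proof-only model of A's split('-'))
def mysplit (cur : List Char) : List Char → List (List Char)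
  | [] => [cur]
  | c :: r => if c = '-' then cur :: mysplit [] r else mysplit (cur ++ [c]) r

theorem splitOn_go_eq (l : List Char) : ∀ (fuel : Nat), l.length ≤ fuel →
    ∀ (cur : List Char) (acc : List (List Char)),
    PySem.Chars.splitOn.go ['-'] fuel l cur acc = acc.reverse ++ mysplit cur.reverse l := by
  induction l with
  | nil =>
    intro fuel _ cur acc
    cases fuel with
    | zero => simp [PySem.Chars.splitOn.go, mysplit]
    | succ f => simp [PySem.Chars.splitOn.go, mysplit]
  | cons c r ih =>
    intro fuel hf cur acc
    cases fuel with
    | zero => simp at hf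
    | succ f =>
      rw [PySem.Chars.splitOn.go]
      have hfl : r.length ≤ f := by simpa using hf
      by_cases hc : c = '-'
      · subst hc
        have hpre : List.isPrefixOf ['-'] ('-' :: r) = true := by simp [List.isPrefixOf]
        rw [if_pos hpre]
        have hd : List.drop (List.length ['-']) ('-' :: r) = r := by simp
        rw [hd]
        rw [ih f hfl [] (cur.reverse :: acc)]
        simp [mysplit]
      · have hpre : List.isPrefixOf ['-'] (c :: r) = false := by
          simp [List.isPrefixOf]; exact fun h => hc h.symm
        rw [if_neg (by simp [hpre])]
        rw [ih f hfl (c :: cur) acc]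
        simp [mysplit, hc]

theorem splitOn_eq_mysplit (cs : List Char) : PySem.Chars.splitOn cs ['-'] = mysplit [] cs := by
  rw [PySem.Chars.splitOn]
  rw [splitOn_go_eq cs (cs.length + 1) (by omega) [] []]
  simp

theorem mysplit_ne_nil (cur : List Char) (l : List Char) : mysplit cur l ≠ [] := by
  induction l generalizing cur with
  | nil => simp [mysplit]
  | cons c r ih =>
    rw [mysplit]
    by_cases hc : c = '-'
    · simp [hc]
    · rw [if_neg hc]; exact ih _

theorem intercalate_mysplit (l : List Char) : ∀ cur, List.intercalate ['-'] (mysplit cur l) = cur ++ l := by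
  induction l with
  | nil => intro cur; simp [mysplit, List.intercalate]
  | cons c r ih =>
    intro cur
    rw [mysplit]
    by_cases hc : c = '-'
    · rw [if_pos hc, hc]
      obtain ⟨p, ps, hps⟩ : ∃ p ps, mysplit [] r = p :: ps := by
        cases h : mysplit ([] : List Char) r with
        | nil => exact absurd h (mysplit_ne_nil _ _)
        | cons p ps => exact ⟨p, ps, rfl⟩
      have hstep : List.intercalate ['-'] (cur :: p :: ps) = cur ++ '-' :: List.intercalate ['-'] (p :: ps) := by
        simp only [List.intercalate, List.intersperse_cons₂, List.flatten_cons, List.cons_append, List.nil_append]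
      have := ih ([] : List Char)
      rw [hps] at this
      rw [hps, hstep, this]
      simp
    · rw [if_neg hc, ih]
      simp

theorem ne_dash_of_isalnum {c : Char} (h : PySem.Chars.isalnum c = true) : ¬ (c = '-') := by
  intro he; subst he
  have : PySem.Chars.isalnum '-' = false := by decide
  rw [this] at h; exact Bool.false_ne_true h

theorem list_len4 {α : Type} {l : List α} (h : l.length = 4) : ∃ a b c d, l = [a, b, c, d] := by
  rcases l with _ | ⟨a, _ | ⟨b, _ | ⟨c, _ | ⟨d, _ | ⟨e, t⟩⟩⟩⟩⟩ <;> simp at h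
  exact ⟨a, b, c, d, rfl⟩

theorem a_of_b {code : String} (h : is_recovery_code_format_alt code = true) :
    is_recovery_code_format code = true := by
  unfold is_recovery_code_format_alt at h
  split_ifs at h with h1 h2
  generalize hcs : code.toList = cs at h1 h2 h
  have hlen : cs.length ≠ 19 → False := fun hk => h1 hk
  rcases cs with _ | ⟨c0, cs⟩
  · simp at hlen
  rcases cs with _ | ⟨c1, cs⟩
  · simp at hlen
  rcases cs with _ | ⟨c2, cs⟩
  · simp at hlen
  rcases cs with _ | ⟨c3, cs⟩
  · simp at hlen
  rcases cs with _ | ⟨c4, cs⟩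
  · simp at hlen
  rcases cs with _ | ⟨c5, cs⟩
  · simp at hlen
  rcases cs with _ | ⟨c6, cs⟩
  · simp at hlen
  rcases cs with _ | ⟨c7, cs⟩
  · simp at hlen
  rcases cs with _ | ⟨c8, cs⟩
  · simp at hlen
  rcases cs with _ | ⟨c9, cs⟩
  · simp at hlen
  rcases cs with _ | ⟨c10, cs⟩
  · simp at hlen
  rcases cs with _ | ⟨c11, cs⟩
  · simp at hlen
  rcases cs with _ | ⟨c12, cs⟩
  · simp at hlen
  rcases cs with _ | ⟨c13, cs⟩
  · simp at hlen
  rcases cs with _ | ⟨c14, cs⟩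
  · simp at hlen
  rcases cs with _ | ⟨c15, cs⟩
  · simp at hlen
  rcases cs with _ | ⟨c16, cs⟩
  · simp at hlen
  rcases cs with _ | ⟨c17, cs⟩
  · simp at hlen
  rcases cs with _ | ⟨c18, cs⟩
  · simp at hlen
  have hnil : cs = [] := by
    refine List.length_eq_zero_iff.mp ?_
    by_contra hne
    apply hlen
    simp only [List.length_cons]
    omega
  subst hnil
  obtain ⟨hd4, hd9, hd14⟩ := h2
  simp [PySem.List.pyGetD, PySem.List.pyGet?, PySem.List.pyIdx?] at hd4 hd9 hd14
  subst hd4 hd9 hd14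
  simp only [show PySem.List.pyRange 0 19 1 = [0,1,2,3,4,5,6,7,8,9,10,11,12,13,14,15,16,17,18] from rfl,
    List.all_cons, List.all_nil] at h
  simp [PySem.List.pyGetD, PySem.List.pyGet?, PySem.List.pyIdx?] at h
  obtain ⟨h0, h1, h2, h3, h5, h6, h7, h8, h10, h11, h12, h13, h15, h16, h17, h18⟩ := h
  have hne0 : ¬ (c0 = '-') := ne_dash_of_isalnum h0
  have hne1 : ¬ (c1 = '-') := ne_dash_of_isalnum h1
  have hne2 : ¬ (c2 = '-') := ne_dash_of_isalnum h2
  have hne3 : ¬ (c3 = '-') := ne_dash_of_isalnum h3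
  have hne5 : ¬ (c5 = '-') := ne_dash_of_isalnum h5
  have hne6 : ¬ (c6 = '-') := ne_dash_of_isalnum h6
  have hne7 : ¬ (c7 = '-') := ne_dash_of_isalnum h7
  have hne8 : ¬ (c8 = '-') := ne_dash_of_isalnum h8
  have hne10 : ¬ (c10 = '-') := ne_dash_of_isalnum h10
  have hne11 : ¬ (c11 = '-') := ne_dash_of_isalnum h11
  have hne12 : ¬ (c12 = '-') := ne_dash_of_isalnum h12
  have hne13 : ¬ (c13 = '-') := ne_dash_of_isalnum h13
  have hne15 : ¬ (c15 = '-') := ne_dash_of_isalnum h15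
  have hne16 : ¬ (c16 = '-') := ne_dash_of_isalnum h16
  have hne17 : ¬ (c17 = '-') := ne_dash_of_isalnum h17
  have hne18 : ¬ (c18 = '-') := ne_dash_of_isalnum h18
  unfold is_recovery_code_format
  rw [hcs]
  rw [splitOn_eq_mysplit]
  simp [mysplit, hne0, hne1, hne2, hne3, hne5, hne6, hne7, hne8, hne10, hne11, hne12, hne13, hne15, hne16, hne17, hne18, PySem.Chars.strIsalnum, h0, h1, h2, h3, h5, h6, h7, h8, h10, h11, h12, h13, h15, h16, h17, h18]

theorem b_of_a {code : String} (h : is_recovery_code_format code = true) :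
    is_recovery_code_format_alt code = true := by
  unfold is_recovery_code_format at h
  dsimp only [] at h
  split_ifs at h with h1 h2
  generalize hcs : code.toList = cs at h1 h2 h
  rw [splitOn_eq_mysplit] at h2 h
  obtain ⟨p0, p1, p2, p3, hms⟩ := list_len4 (not_ne_iff.mp h2)
  rw [hms] at h
  simp only [List.all_cons, List.all_nil, Bool.and_true, Bool.and_eq_true, beq_iff_eq,
    Bool.and_eq_true] at h
  obtain ⟨⟨hl0, ha0⟩, ⟨hl1, ha1⟩, ⟨hl2, ha2⟩, ⟨hl3, ha3⟩⟩ := h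
  obtain ⟨a0, a1, a2, a3, rfl⟩ := list_len4 hl0
  obtain ⟨b0, b1, b2, b3, rfl⟩ := list_len4 hl1
  obtain ⟨d0, d1, d2, d3, rfl⟩ := list_len4 hl2
  obtain ⟨e0, e1, e2, e3, rfl⟩ := list_len4 hl3
  have hrec : cs = List.intercalate ['-'] (mysplit [] cs) := by
    rw [intercalate_mysplit cs []]; rfl
  rw [hms] at hrec
  have hint : List.intercalate ['-'] [[a0,a1,a2,a3],[b0,b1,b2,b3],[d0,d1,d2,d3],[e0,e1,e2,e3]] =
      [a0,a1,a2,a3] ++ '-' :: ([b0,b1,b2,b3] ++ '-' :: ([d0,d1,d2,d3] ++ '-' :: [e0,e1,e2,e3])) := by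
    simp [List.intercalate]
  rw [hint] at hrec
  simp only [List.cons_append, List.nil_append] at hrec
  simp only [PySem.Chars.strIsalnum, List.all_cons, List.all_nil, Bool.and_true,
    Bool.and_eq_true] at ha0 ha1 ha2 ha3
  unfold is_recovery_code_format_alt
  rw [hcs, hrec]
  simp [PySem.List.pyGetD, PySem.List.pyGet?, PySem.List.pyIdx?,
    show PySem.List.pyRange 0 19 1 = [0,1,2,3,4,5,6,7,8,9,10,11,12,13,14,15,16,17,18] from rfl,
    ha0.2.1, ha0.2.2.1, ha0.2.2.2, ha1, ha2, ha3]

-- ===== VERDICT (by name: the statement is the Claim_ definition above) =====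
theorem is_recovery_code_format_spec : Claim_equal_is_recovery_code_format := by
  intro code _
  unfold Spec_is_recovery_code_format
  cases hA : is_recovery_code_format code with
  | true => exact (b_of_a hA).symm
  | false =>
    cases hB : is_recovery_code_format_alt code with
    | true => exact absurd (a_of_b hB) (by simp [hA])
    | false => rfl
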